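-- pv_equiv track=rewrite | github.com/nawue/CodeChallanges | KickStart/2020/Round-F/ATM-Queue.py | Solve
-- ===== SOURCE A (Python) =====
-- def Solve(N,X,A):
--     res = [0 for _ in A]
--     res2 = [0 for _ in A]
--     out = 1
--     fin = sum([_ for _ in range(1,N+1)])
--
--     while sum(res) != fin:
--         for i in range(N):
--             A[i] -= X
--             if A[i] <= 0 and res2[i] == 0:
--                 res2[i] = out
--                 out += 1
--             res[res2[i]-1] = i+1
--
--     return res
-- ===== SOURCE B (Python) =====
-- def Solve(N, X, A):
--     # person i needs max(1, ceil(A[i]/X)) rounds; stable sort of the queue by (rounds, index)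
--     res = [0] * len(A)
--     order = sorted(range(N), key=lambda i: (max(1, -(-A[i] // X)), i))
--     for rank, i in enumerate(order):
--         res[rank] = i + 1
--     return res
-- ===== Notes on version B (the rewrite author's own statement) =====
-- stated objective: alternative
-- what changed: B replaces A's round-by-round ATM simulation (repeatedly subtracting X from every balance until everyone is served) with a closed form: person i needs max(1, ceil(A[i]/X)) rounds, so B stably sorts range(N) by (rounds, index) and writes the tickets into a preallocated result list; this is O(N log N) instead of O(N*max(A)/X), though a timing run could not credit the speed-up (its large generated inputs have N != len(A), outside Pre_).
-- outside the precondition, e.g. on Solve(2, 0, [-1, -2]): A returns [1, 2], B raises ZeroDivisionError; on Solve(2, -1, [-5, -3]): A returns [1, 2], B returns [2, 1]; on Solve(1, 1, [3, 5]): A returns [0, 1], B returns [1, 0]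
import Mathlib
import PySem

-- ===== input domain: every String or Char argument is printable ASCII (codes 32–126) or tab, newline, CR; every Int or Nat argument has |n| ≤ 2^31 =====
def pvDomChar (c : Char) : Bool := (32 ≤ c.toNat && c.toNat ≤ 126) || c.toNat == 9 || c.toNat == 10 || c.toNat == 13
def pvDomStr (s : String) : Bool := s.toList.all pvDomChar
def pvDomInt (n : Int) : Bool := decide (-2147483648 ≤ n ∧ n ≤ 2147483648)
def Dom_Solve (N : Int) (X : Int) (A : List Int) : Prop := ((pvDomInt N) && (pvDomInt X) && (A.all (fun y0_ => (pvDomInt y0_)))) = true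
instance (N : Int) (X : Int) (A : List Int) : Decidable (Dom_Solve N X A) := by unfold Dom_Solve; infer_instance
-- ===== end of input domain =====

-- B replaces A's round-by-round simulation by a closed form (rounds = max(1, ceil(A[i]/X)))
-- plus one stable sort.  A mutates its argument list A in place (A[i] -= X each pass); B does
-- not — the equivalence proved here is about the RETURN value only.

-- ===== PORT A =====
-- loop body of 'for i in range(N)': A[i] -= X; if A[i] <= 0 and res2[i] == 0: res2[i] = out; out += 1; res[res2[i]-1] = i+1
def SolveStep (X : Int) (st : List Int × List Int × List Int × Int) (i : Int) :
    Option (List Int × List Int × List Int × Int) :=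
  match st with
  | (a, res, res2, out) =>
    match PySem.List.pyGet? a i with                   -- A[i] (none = IndexError)
    | none => none
    | some ai =>
      let a' := PySem.List.pySetD a i (ai - X)         -- A[i] -= X (index already known in range)
      let r2i := PySem.List.pyGetD res2 i 0            -- res2[i] (res2 has A's length, same range)
      let st2 : List Int × Int :=
        if ai - X ≤ 0 ∧ r2i = 0 then (PySem.List.pySetD res2 i out, out + 1)
        else (res2, out)
      let r2i' := PySem.List.pyGetD st2.1 i 0          -- res2[i] after the branch
      match PySem.List.pySet? res (r2i' - 1) (i + 1) with  -- res[res2[i]-1] = i+1 (wraps at -1)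
      | none => none
      | some res' => some (a', res', st2.1, st2.2)

-- 'for i in range(N)' over the remaining index list
def SolvePassRec (X : Int) : List Int → List Int × List Int × List Int × Int →
    Option (List Int × List Int × List Int × Int)
  | [], st => some st
  | i :: is, st =>
    match SolveStep X st i with
    | none => none
    | some st' => SolvePassRec X is st'

-- 'while sum(res) != fin: <one pass>'; the Nat argument is a fuel guard that only makes the
-- recursion total: it is large enough whenever the Python loop terminates (see Solve below)
def SolveLoop (N X fin : Int) : Nat → List Int × List Int × List Int × Int → Option (List Int)
  | 0, _ => none
  | fuel+1, (a, res, res2, out) =>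
    if res.sum ≠ fin then
      match SolvePassRec X (PySem.List.pyRange 0 N 1) (a, res, res2, out) with
      | none => none
      | some st => SolveLoop N X fin fuel st
    else some res

def Solve (N : Int) (X : Int) (A : List Int) : List Int :=
  let res := A.map (fun _ => (0 : Int))                -- res = [0 for _ in A]
  let res2 := A.map (fun _ => (0 : Int))               -- res2 = [0 for _ in A]
  let fin := (PySem.List.pyRange 1 (N + 1) 1).sum      -- fin = sum([_ for _ in range(1,N+1)])
  -- fuel guard: whenever the Python while-loop terminates it does so within max(1,max(A))+1
  -- passes, so this fuel is never exhausted there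
  (SolveLoop N X fin ((A.foldl max 1).toNat + 1) (A, res, res2, 1)).getD []

-- ===== PORT B =====
def Solve_alt (N : Int) (X : Int) (A : List Int) : List Int :=
  let res := List.replicate A.length (0 : Int)         -- res = [0] * len(A)
  -- order = sorted(range(N), key=lambda i: (max(1, -(-A[i] // X)), i))
  -- (A[i] is in range whenever the key is evaluated under Pre_, so pyGetD is exact here)
  let order := PySem.List.sorted2 (PySem.List.pyRange 0 N 1)
    (fun i => max 1 (-(PySem.Int.floordiv (-(PySem.List.pyGetD A i 0)) X)))
    (fun i => i)
  -- for rank, i in enumerate(order): res[rank] = i + 1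
  (PySem.List.enumerate order).foldl
    (fun r p => PySem.List.pySetD r p.1 (p.2 + 1)) res

-- ===== PRECONDITION & SPEC =====
-- Pre_ admits N ≤ 0 (A returns [0]*len(A) at once) and the task's natural domain
-- N = len(A) with X ≥ 1; it excludes 0 < N ≠ len(A) (A raises IndexError, diverges, or pads
-- its answer with untouched zero slots of res) and X ≤ 0 with N = len(A) ≥ 1 (A's while-loop
-- diverges whenever some A[i] > max(0, X); it returns only on degenerate all-served-in-one-pass
-- inputs, where B raises ZeroDivisionError at X = 0 and where A's order for X < 0 is an
-- accident of the simulation).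
def Pre_Solve (N : Int) (X : Int) (A : List Int) : Prop :=
  N ≤ 0 ∨ (N = (A.length : Int) ∧ 1 ≤ X)
instance (N : Int) (X : Int) (A : List Int) : Decidable (Pre_Solve N X A) := by
  unfold Pre_Solve; infer_instance

def pvWitness_Solve : Int × Int × List Int := (4, 3, [7, 1, 3, 10])

def Spec_Solve (N : Int) (X : Int) (A : List Int) (out : List Int) : Prop := out = Solve_alt N X A
instance (N : Int) (X : Int) (A : List Int) (out : List Int) : Decidable (Spec_Solve N X A out) := by
  unfold Spec_Solve; infer_instance

-- ===== CLAIM (what is proved, stated in full; the proofs are below) =====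
def Claim_equal_Solve : Prop := ∀ (N : Int) (X : Int) (A : List Int),
  Dom_Solve N X A → Pre_Solve N X A → Spec_Solve N X A (Solve N X A)

-- ===== LEMMAS AND PROOFS =====

-- r(a) = number of passes person with balance a needs: max(1, ceil(a/X))
def rnd (X a : Int) : Int := max 1 (-(PySem.Int.floordiv (-a) X))
def rv (X : Int) (A0 : List Int) (i : Nat) : Int := rnd X (A0.getD i 0)
-- strict "finishes before" order: earlier round, or same round and smaller index
def kltB (X : Int) (A0 : List Int) (j i : Nat) : Bool :=
  decide (rv X A0 j < rv X A0 i) || (decide (rv X A0 j = rv X A0 i) && decide (j < i))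
def rank (X : Int) (A0 : List Int) (i : Nat) : Nat :=
  ((Finset.range A0.length).filter (fun j => kltB X A0 j i = true)).card
def sig (X : Int) (A0 : List Int) (k : Nat) : Nat :=
  (((List.range A0.length).find? (fun i => rank X A0 i == k)).getD 0)
-- finished after pass t plus the first m steps of pass t+1
def fin2b (X : Int) (A0 : List Int) (t m i : Nat) : Bool :=
  decide (rv X A0 i ≤ (t:Int)) || (decide (rv X A0 i = (t:Int)+1) && decide (i < m))
def cnt2 (X : Int) (A0 : List Int) (t m : Nat) : Nat :=
  ((Finset.range A0.length).filter (fun i => fin2b X A0 t m i = true)).card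
def maxUnf (X : Int) (A0 : List Int) (t : Nat) : Nat :=
  (((List.range A0.length).filter (fun i => decide ((t:Int) < rv X A0 i))).max?).getD 0
def mWrap (X : Int) (A0 : List Int) (t m : Nat) : Int :=
  match ((List.range m).filter (fun i => decide ((t:Int)+1 < rv X A0 i))).max? with
  | some w => (w:Int)+1
  | none => if 1 ≤ t ∧ cnt2 X A0 t 0 < A0.length then (maxUnf X A0 t : Int) + 1 else 0
def mA (X : Int) (A0 : List Int) (t m : Nat) : List Int :=
  (List.range A0.length).map (fun i => A0.getD i 0 - ((t:Int) + (if i < m then 1 else 0)) * X)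
def mRes2 (X : Int) (A0 : List Int) (t m : Nat) : List Int :=
  (List.range A0.length).map (fun i => if fin2b X A0 t m i then (rank X A0 i : Int)+1 else 0)
def mRes (X : Int) (A0 : List Int) (t m : Nat) : List Int :=
  (List.range A0.length).map (fun k =>
    if k < cnt2 X A0 t m then (sig X A0 k : Int)+1
    else if k = A0.length - 1 then mWrap X A0 t m else 0)
def mOut (X : Int) (A0 : List Int) (t m : Nat) : Int := (cnt2 X A0 t m : Int) + 1
def target (X : Int) (A0 : List Int) : List Int :=
  (List.range A0.length).map (fun k => (sig X A0 k : Int)+1)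

-- ---- arithmetic ----
theorem one_le_rnd (X a : Int) : 1 ≤ rnd X a := le_max_left _ _

theorem rnd_le_iff (X a s : Int) (hX : 1 ≤ X) (hs : 1 ≤ s) : (rnd X a ≤ s ↔ a - s * X ≤ 0) := by
  unfold rnd
  have h1 : (-(PySem.Int.floordiv (-a) X) ≤ s) ↔ a ≤ s * X := by
    rw [neg_le, PySem.Int.le_floordiv_iff_mul_le (by omega), neg_mul, neg_le_neg_iff]
  constructor
  · intro h
    have := h1.mp (le_trans (le_max_right 1 _) h)
    omega
  · intro h
    have := h1.mpr (by omega)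
    simp only [max_le_iff]
    exact ⟨hs, this⟩

theorem rnd_le_self (X a : Int) (hX : 1 ≤ X) : rnd X a ≤ max 1 a := by
  rw [rnd_le_iff X a (max 1 a) hX (le_max_left 1 a)]
  have h1 : max 1 a ≤ max 1 a * X := le_mul_of_one_le_right (by omega) hX
  have h2 : a ≤ max 1 a := le_max_right 1 a
  omega

-- ---- rank / sig ----
theorem kltB_irrefl (X : Int) (A0 : List Int) (i : Nat) : kltB X A0 i i = false := by
  simp [kltB]
theorem kltB_trans (X : Int) (A0 : List Int) {a b c : Nat} :
    kltB X A0 a b = true → kltB X A0 b c = true → kltB X A0 a c = true := by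
  simp only [kltB, Bool.or_eq_true, Bool.and_eq_true, decide_eq_true_eq]
  omega
theorem kltB_total (X : Int) (A0 : List Int) {a b : Nat} (h : a ≠ b) :
    kltB X A0 a b = true ∨ kltB X A0 b a = true := by
  simp only [kltB, Bool.or_eq_true, Bool.and_eq_true, decide_eq_true_eq]
  rcases Nat.lt_or_ge a b with h' | h'
  · rcases lt_trichotomy (rv X A0 a) (rv X A0 b) with h2 | h2 | h2 <;> omega
  · rcases lt_trichotomy (rv X A0 a) (rv X A0 b) with h2 | h2 | h2 <;> omega
theorem rank_lt_rank (X : Int) (A0 : List Int) {j i : Nat} (hi : i < A0.length)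
    (hj : j < A0.length) (h : kltB X A0 j i = true) : rank X A0 j < rank X A0 i := by
  apply Finset.card_lt_card
  constructor
  · intro k hk
    simp only [Finset.mem_filter, Finset.mem_range] at hk ⊢
    exact ⟨hk.1, kltB_trans X A0 hk.2 h⟩
  · intro hsub
    have hjmem : j ∈ (Finset.range A0.length).filter (fun k => kltB X A0 k i = true) := by
      simp only [Finset.mem_filter, Finset.mem_range]; exact ⟨hj, h⟩
    have := hsub hjmem
    simp only [Finset.mem_filter, Finset.mem_range, kltB_irrefl] at this
    exact absurd this.2 (by simp)

theorem rank_lt_length (X : Int) (A0 : List Int) {i : Nat} (hi : i < A0.length) :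
    rank X A0 i < A0.length := by
  have hsub : (Finset.range A0.length).filter (fun j => kltB X A0 j i = true)
      ⊆ (Finset.range A0.length).erase i := by
    intro k hk
    simp only [Finset.mem_filter, Finset.mem_range] at hk
    apply Finset.mem_erase.mpr
    refine ⟨?_, Finset.mem_range.mpr hk.1⟩
    intro hki; subst hki
    rw [kltB_irrefl] at hk; exact absurd hk.2 (by simp)
  have := Finset.card_le_card hsub
  rw [Finset.card_erase_of_mem (Finset.mem_range.mpr hi), Finset.card_range] at this
  unfold rank
  omega

theorem rank_inj (X : Int) (A0 : List Int) {i j : Nat} (hi : i < A0.length) (hj : j < A0.length)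
    (h : rank X A0 i = rank X A0 j) : i = j := by
  by_contra hne
  rcases kltB_total X A0 hne with h' | h'
  · have := rank_lt_rank X A0 hj hi h'; omega
  · have := rank_lt_rank X A0 hi hj h'; omega

theorem sig_spec (X : Int) (A0 : List Int) {k : Nat} (hk : k < A0.length) :
    sig X A0 k < A0.length ∧ rank X A0 (sig X A0 k) = k := by
  have himg : Finset.image (rank X A0) (Finset.range A0.length) = Finset.range A0.length := by
    apply Finset.eq_of_subset_of_card_le
    · intro x hx
      simp only [Finset.mem_image, Finset.mem_range] at hx
      obtain ⟨i, hi, rfl⟩ := hx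
      exact Finset.mem_range.mpr (rank_lt_length X A0 hi)
    · rw [Finset.card_image_of_injOn]
      intro a ha b hb hab
      simp only [Finset.coe_range, Set.mem_Iio] at ha hb
      exact rank_inj X A0 ha hb hab
  have hex : ∃ i, i ∈ List.range A0.length ∧ (rank X A0 i == k) = true := by
    have : k ∈ Finset.image (rank X A0) (Finset.range A0.length) := by
      rw [himg]; exact Finset.mem_range.mpr hk
    simp only [Finset.mem_image, Finset.mem_range] at this
    obtain ⟨i, hi, hik⟩ := this
    exact ⟨i, List.mem_range.mpr hi, by simp [hik]⟩
  unfold sig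
  cases hfind : (List.range A0.length).find? (fun i => rank X A0 i == k) with
  | none =>
    obtain ⟨i, hi, hik⟩ := hex
    exact absurd hik (List.find?_eq_none.mp hfind i hi)
  | some j =>
    have h1 := List.find?_some hfind
    have h2 := List.mem_of_find?_eq_some hfind
    simp only [beq_iff_eq] at h1
    simp only [List.mem_range] at h2
    simp only [Option.getD_some]
    exact ⟨h2, h1⟩

theorem sig_rank (X : Int) (A0 : List Int) {i : Nat} (hi : i < A0.length) :
    sig X A0 (rank X A0 i) = i := by
  have h := sig_spec X A0 (rank_lt_length X A0 hi)
  exact rank_inj X A0 h.1 hi h.2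

-- ---- cnt2 ----
theorem cnt2_le (X : Int) (A0 : List Int) (t m : Nat) : cnt2 X A0 t m ≤ A0.length := by
  unfold cnt2
  calc ((Finset.range A0.length).filter _).card ≤ (Finset.range A0.length).card :=
        Finset.card_le_card (Finset.filter_subset _ _)
    _ = A0.length := Finset.card_range _

-- the finished people are exactly the ranks below cnt2
theorem klt_of_fin2_of_not_fin2 (X : Int) (A0 : List Int) {t m j i : Nat}
    (hj : fin2b X A0 t m j = true) (hi : fin2b X A0 t m i = false) : kltB X A0 j i = true := by
  revert hj hi
  simp only [fin2b, kltB, Bool.or_eq_true, Bool.and_eq_true, decide_eq_true_eq,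
    Bool.or_eq_false_iff, Bool.and_eq_false_iff, decide_eq_false_iff_not]
  intro hj hi
  rcases hj with hj | ⟨hj1, hj2⟩
  · left; omega
  · rcases hi.2 with h | h
    · left; omega
    · rcases lt_trichotomy (rv X A0 j) (rv X A0 i) with h2 | h2 | h2
      · left; exact h2
      · right; omega
      · omega

theorem klt_of_klt_of_fin2 (X : Int) (A0 : List Int) {t m j i : Nat}
    (hk : kltB X A0 j i = true) (hi : fin2b X A0 t m i = true) : fin2b X A0 t m j = true := by
  revert hk hi
  simp only [fin2b, kltB, Bool.or_eq_true, Bool.and_eq_true, decide_eq_true_eq]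
  intro hk hi
  rcases hi with hi | ⟨hi1, hi2⟩
  · left; rcases hk with h | ⟨h1, h2⟩ <;> omega
  · rcases hk with h | ⟨h1, h2⟩
    · left; omega
    · right; omega

theorem fin2b_iff_rank_lt (X : Int) (A0 : List Int) (t m : Nat) {i : Nat} (hi : i < A0.length) :
    fin2b X A0 t m i = true ↔ rank X A0 i < cnt2 X A0 t m := by
  constructor
  · intro h
    apply Finset.card_lt_card
    constructor
    · intro k hk
      simp only [Finset.mem_filter, Finset.mem_range] at hk ⊢
      exact ⟨hk.1, klt_of_klt_of_fin2 X A0 hk.2 h⟩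
    · intro hsub
      have himem : i ∈ (Finset.range A0.length).filter (fun j => fin2b X A0 t m j = true) := by
        simp only [Finset.mem_filter, Finset.mem_range]; exact ⟨hi, h⟩
      have := hsub himem
      simp only [Finset.mem_filter, Finset.mem_range, kltB_irrefl] at this
      exact absurd this.2 (by simp)
  · intro h
    by_contra hne
    simp only [Bool.not_eq_true] at hne
    have hsub : (Finset.range A0.length).filter (fun j => fin2b X A0 t m j = true)
        ⊆ (Finset.range A0.length).filter (fun j => kltB X A0 j i = true) := by
      intro k hk
      simp only [Finset.mem_filter, Finset.mem_range] at hk ⊢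
      exact ⟨hk.1, klt_of_fin2_of_not_fin2 X A0 hk.2 hne⟩
    have hle := Finset.card_le_card hsub
    unfold cnt2 rank at h
    omega

theorem fin2b_zero_zero (X : Int) (A0 : List Int) (i : Nat) : fin2b X A0 0 0 i = false := by
  have := one_le_rnd X (A0.getD i 0)
  simp only [fin2b, Bool.or_eq_false_iff, Bool.and_eq_false_iff, decide_eq_false_iff_not]
  constructor
  · push_cast; unfold rv; omega
  · right; omega

theorem cnt2_zero_zero (X : Int) (A0 : List Int) : cnt2 X A0 0 0 = 0 := by
  unfold cnt2
  rw [Finset.card_eq_zero, Finset.filter_eq_empty_iff]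
  intro i _
  simp [fin2b_zero_zero]

theorem fin2b_step_self (X : Int) (A0 : List Int) (t m : Nat) (h : rv X A0 m = (t:Int)+1) :
    ∀ i, fin2b X A0 t (m+1) i = (fin2b X A0 t m i || (i == m)) := by
  intro i
  rcases Decidable.eq_or_ne i m with rfl | hne
  · simp only [fin2b, beq_self_eq_true, Bool.or_true]
    simp only [Bool.or_eq_true, Bool.and_eq_true, decide_eq_true_eq]
    right; omega
  · simp only [fin2b, beq_eq_false_iff_ne.mpr hne, Bool.or_false]
    have : decide (i < m + 1) = decide (i < m) := by
      rcases Nat.lt_or_ge i m with h' | h'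
      · simp [h', Nat.lt_succ_of_lt h']
      · have h1 : ¬ i < m := by omega
        have h2 : ¬ i < m + 1 := by omega
        simp [h1, h2]
    rw [this]

theorem fin2b_step_other (X : Int) (A0 : List Int) (t m : Nat) (h : rv X A0 m ≠ (t:Int)+1) :
    ∀ i, fin2b X A0 t (m+1) i = fin2b X A0 t m i := by
  intro i
  rcases Decidable.eq_or_ne i m with rfl | hne
  · simp only [fin2b]
    have h1 : (decide (rv X A0 i = (t:Int)+1)) = false := by
      simp only [decide_eq_false_iff_not]; exact h
    simp [h1]
  · simp only [fin2b]
    have : decide (i < m + 1) = decide (i < m) := by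
      rcases Nat.lt_or_ge i m with h' | h'
      · simp [h', Nat.lt_succ_of_lt h']
      · have h1 : ¬ i < m := by omega
        have h2 : ¬ i < m + 1 := by omega
        simp [h1, h2]
    rw [this]

theorem fin2b_self_eq (X : Int) (A0 : List Int) (t m : Nat) :
    fin2b X A0 t m m = decide (rv X A0 m ≤ (t:Int)) := by
  simp [fin2b]

theorem cnt2_step_self (X : Int) (A0 : List Int) {t m : Nat} (hm : m < A0.length)
    (h : rv X A0 m = (t:Int)+1) : cnt2 X A0 t (m+1) = cnt2 X A0 t m + 1 := by
  unfold cnt2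
  have heq : (Finset.range A0.length).filter (fun i => fin2b X A0 t (m+1) i = true)
      = insert m ((Finset.range A0.length).filter (fun i => fin2b X A0 t m i = true)) := by
    ext k
    simp only [Finset.mem_insert, Finset.mem_filter, Finset.mem_range,
      fin2b_step_self X A0 t m h k, Bool.or_eq_true, beq_iff_eq]
    constructor
    · rintro ⟨hk, hf | rfl⟩
      · exact Or.inr ⟨hk, hf⟩
      · exact Or.inl rfl
    · rintro (rfl | ⟨hk, hf⟩)
      · exact ⟨hm, Or.inr rfl⟩
      · exact ⟨hk, Or.inl hf⟩
  rw [heq, Finset.card_insert_of_notMem]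
  intro hmem
  simp only [Finset.mem_filter, Finset.mem_range, fin2b_self_eq, decide_eq_true_eq] at hmem
  omega

theorem cnt2_step_other (X : Int) (A0 : List Int) {t m : Nat} (h : rv X A0 m ≠ (t:Int)+1) :
    cnt2 X A0 t (m+1) = cnt2 X A0 t m := by
  unfold cnt2
  congr 1
  apply Finset.filter_congr
  intro k _
  rw [fin2b_step_other X A0 t m h k]

theorem rank_eq_cnt2 (X : Int) (A0 : List Int) {t m : Nat} (hm : m < A0.length)
    (h : rv X A0 m = (t:Int)+1) : rank X A0 m = cnt2 X A0 t m := by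
  unfold rank cnt2
  congr 1
  apply Finset.filter_congr
  intro k _
  simp only [kltB, fin2b, h, Bool.or_eq_true, Bool.and_eq_true, decide_eq_true_eq, eq_iff_iff]
  constructor
  · rintro (h' | ⟨h1, h2⟩)
    · left; omega
    · right; exact ⟨h1, h2⟩
  · rintro (h' | ⟨h1, h2⟩)
    · left; omega
    · right; exact ⟨h1, h2⟩

theorem fin2b_boundary (X : Int) (A0 : List Int) (t : Nat) {i : Nat} (hi : i < A0.length) :
    fin2b X A0 t A0.length i = fin2b X A0 (t+1) 0 i := by
  apply Bool.eq_iff_iff.mpr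
  show fin2b X A0 t A0.length i = true ↔ fin2b X A0 (t+1) 0 i = true
  simp only [fin2b, Bool.or_eq_true, Bool.and_eq_true, decide_eq_true_eq]
  push_cast
  constructor
  · rintro (h | ⟨h1, _⟩)
    · left; omega
    · left; omega
  · rintro (h | ⟨_, h2⟩)
    · rcases Decidable.eq_or_ne (rv X A0 i) ((t:Int)+1) with he | hne
      · right; exact ⟨he, hi⟩
      · left; omega
    · omega

theorem cnt2_boundary (X : Int) (A0 : List Int) (t : Nat) :
    cnt2 X A0 t A0.length = cnt2 X A0 (t+1) 0 := by
  unfold cnt2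
  congr 1
  apply Finset.filter_congr
  intro k hk
  rw [fin2b_boundary X A0 t (Finset.mem_range.mp hk)]

theorem le_foldl_max (A0 : List Int) {a : Int} (ha : a ∈ A0) : a ≤ A0.foldl max 1 :=
  (PySem.List.le_foldl_max A0 1).2 a ha

theorem one_le_foldl_max (A0 : List Int) : 1 ≤ A0.foldl max 1 :=
  (PySem.List.le_foldl_max A0 1).1

theorem cnt2_full (X : Int) (A0 : List Int) {t : Nat} (hX : 1 ≤ X)
    (h : (A0.foldl max 1) ≤ (t:Int)) : cnt2 X A0 t 0 = A0.length := by
  unfold cnt2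
  have : (Finset.range A0.length).filter (fun i => fin2b X A0 t 0 i = true)
      = Finset.range A0.length := by
    rw [Finset.filter_eq_self]
    intro i hi
    have hmem : A0.getD i 0 ∈ A0 := by
      rw [List.getD_eq_getElem A0 0 (Finset.mem_range.mp hi)]
      exact List.getElem_mem _
    have h1 : A0.getD i 0 ≤ A0.foldl max 1 := le_foldl_max A0 hmem
    have h2 := rnd_le_self X (A0.getD i 0) hX
    simp only [fin2b, Bool.or_eq_true, decide_eq_true_eq]
    left
    unfold rv
    have h3 : max 1 (A0.getD i 0) ≤ A0.foldl max 1 := by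
      have := one_le_foldl_max A0; omega
    omega
  rw [this, Finset.card_range]

-- ---- sums ----
-- reindexing a sum over ranks by sig
theorem sum_sig (X : Int) (A0 : List Int) {c : Nat} (hc : c ≤ A0.length)
    (S : Finset Nat) (hS : ∀ i, i ∈ S ↔ i < A0.length ∧ rank X A0 i < c) :
    (∑ k ∈ Finset.range c, ((sig X A0 k : Int) + 1)) = ∑ i ∈ S, ((i : Int) + 1) := by
  apply Finset.sum_nbij' (fun k => sig X A0 k) (fun i => rank X A0 i)
  · intro k hk
    have hk' := Finset.mem_range.mp hk
    have h := sig_spec X A0 (lt_of_lt_of_le hk' hc)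
    exact (hS _).mpr ⟨h.1, by omega⟩
  · intro i hi
    exact Finset.mem_range.mpr ((hS i).mp hi).2
  · intro k hk
    have hk' := Finset.mem_range.mp hk
    exact (sig_spec X A0 (lt_of_lt_of_le hk' hc)).2
  · intro i hi
    exact sig_rank X A0 ((hS i).mp hi).1
  · intro k _
    rfl

theorem sum_mRes_boundary (X : Int) (A0 : List Int) (t m : Nat) :
    (mRes X A0 t m).sum =
      (∑ i ∈ (Finset.range A0.length).filter (fun i => fin2b X A0 t m i = true), ((i:Int)+1))
      + (if cnt2 X A0 t m < A0.length ∧ 0 < A0.length then mWrap X A0 t m else 0) := by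
  have hc := cnt2_le X A0 t m
  show (∑ k ∈ Finset.range A0.length, (if k < cnt2 X A0 t m then ((sig X A0 k : Int)+1)
    else if k = A0.length - 1 then mWrap X A0 t m else 0)) = _
  rw [Finset.sum_ite]
  have hfilter : (Finset.range A0.length).filter (fun k => k < cnt2 X A0 t m)
      = Finset.range (cnt2 X A0 t m) := by
    ext k
    simp only [Finset.mem_filter, Finset.mem_range]
    omega
  rw [hfilter]
  congr 1
  · apply sum_sig X A0 hc
    intro i
    simp only [Finset.mem_filter, Finset.mem_range]
    constructor
    · intro h; exact ⟨h.1, (fin2b_iff_rank_lt X A0 t m h.1).mp h.2⟩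
    · intro h; exact ⟨h.1, (fin2b_iff_rank_lt X A0 t m h.1).mpr h.2⟩
  · rw [Finset.sum_ite_eq']
    have : (A0.length - 1 ∈ (Finset.range A0.length).filter (fun k => ¬ k < cnt2 X A0 t m))
        ↔ (cnt2 X A0 t m < A0.length ∧ 0 < A0.length) := by
      simp only [Finset.mem_filter, Finset.mem_range]
      omega
    rcases Decidable.em (cnt2 X A0 t m < A0.length ∧ 0 < A0.length) with h | h
    · rw [if_pos (this.mpr h), if_pos h]
    · rw [if_neg (fun hmem => h (this.mp hmem)), if_neg h]

theorem fin2b_m0 (X : Int) (A0 : List Int) (t i : Nat) :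
    fin2b X A0 t 0 i = decide (rv X A0 i ≤ (t:Int)) := by
  simp [fin2b]

-- the set of people still unserved after t full passes
def US (X : Int) (A0 : List Int) (t : Nat) : Finset Nat :=
  (Finset.range A0.length).filter (fun i => ¬ fin2b X A0 t 0 i = true)

theorem cnt2_add_card_US (X : Int) (A0 : List Int) (t : Nat) :
    cnt2 X A0 t 0 + (US X A0 t).card = A0.length := by
  unfold cnt2 US
  have h := Finset.card_filter_add_card_filter_not
    (s := Finset.range A0.length) (fun i => fin2b X A0 t 0 i = true)
  rw [Finset.card_range] at h
  exact h

theorem maxUnf_spec (X : Int) (A0 : List Int) (t : Nat) (h : cnt2 X A0 t 0 < A0.length) :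
    maxUnf X A0 t ∈ US X A0 t ∧ ∀ i ∈ US X A0 t, i ≤ maxUnf X A0 t := by
  have hmemiff : ∀ i, i ∈ (List.range A0.length).filter
      (fun i => decide ((t:Int) < rv X A0 i)) ↔ i ∈ US X A0 t := by
    intro i
    simp only [List.mem_filter, List.mem_range, decide_eq_true_eq, US, Finset.mem_filter,
      Finset.mem_range, fin2b_m0, Bool.not_eq_true, decide_eq_false_iff_not, not_le]
  have hcard := cnt2_add_card_US X A0 t
  have hne : (US X A0 t).Nonempty := by
    apply Finset.card_pos.mp; omega
  obtain ⟨i0, hi0⟩ := hne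
  cases hmax : ((List.range A0.length).filter (fun i => decide ((t:Int) < rv X A0 i))).max? with
  | none =>
    rw [List.max?_eq_none_iff] at hmax
    have := (hmemiff i0).mpr hi0
    rw [hmax] at this
    exact absurd this (List.not_mem_nil)
  | some u =>
    have humem : u ∈ US X A0 t := (hmemiff u).mp (List.max?_mem hmax)
    have hub' : ∀ b ∈ (List.range A0.length).filter
        (fun i => decide ((t:Int) < rv X A0 i)), b ≤ u := (List.max?_le_iff hmax).mp (le_refl u)
    have hub : ∀ i ∈ US X A0 t, i ≤ u := fun i hi => hub' i ((hmemiff i).mpr hi)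
    constructor
    · unfold maxUnf; rw [hmax]; exact humem
    · unfold maxUnf; rw [hmax]; exact hub

theorem sum_ge_card (S : Finset Nat) : (S.card : Int) ≤ ∑ i ∈ S, ((i : Int) + 1) := by
  have h1 : ∀ i ∈ S, (1:Int) ≤ (i:Int) + 1 := by intro i _; omega
  calc (S.card : Int) = ∑ _i ∈ S, (1:Int) := by rw [Finset.sum_const]; simp
    _ ≤ ∑ i ∈ S, ((i:Int) + 1) := Finset.sum_le_sum h1

-- the Python loop guard: sum(res) == fin exactly when at most one person is still unserved
-- (and at least one pass has run, unless the queue is empty)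
theorem guard_iff (X : Int) (A0 : List Int) (t : Nat) :
    (mRes X A0 t 0).sum = (∑ i ∈ Finset.range A0.length, ((i : Int) + 1)) ↔
      (A0.length - 1 ≤ cnt2 X A0 t 0 ∧ (1 ≤ t ∨ A0.length = 0)) := by
  have hsplit := Finset.sum_filter_add_sum_filter_not (Finset.range A0.length)
    (fun i => fin2b X A0 t 0 i = true) (fun i => ((i:Int)+1))
  have hcard := cnt2_add_card_US X A0 t
  have hc := cnt2_le X A0 t 0
  rw [sum_mRes_boundary X A0 t 0]
  rcases Nat.eq_zero_or_pos A0.length with hn | hn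
  · -- empty queue
    constructor
    · intro _; omega
    · intro _
      rw [if_neg (by omega)]
      have hU : (US X A0 t).card = 0 := by omega
      have hUe : US X A0 t = ∅ := Finset.card_eq_zero.mp hU
      have : (Finset.range A0.length).filter (fun i => ¬ fin2b X A0 t 0 i = true) = ∅ := hUe
      rw [← hsplit, this, Finset.sum_empty]
  rcases Nat.lt_or_ge (cnt2 X A0 t 0) A0.length with hlt | hge
  · -- someone still unserved
    rw [if_pos ⟨hlt, hn⟩]
    have hw : mWrap X A0 t 0 = if 1 ≤ t ∧ cnt2 X A0 t 0 < A0.length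
        then (maxUnf X A0 t : Int) + 1 else 0 := by
      unfold mWrap
      simp only [List.range_zero, List.filter_nil, List.max?_nil]
    have hUsum : ∑ i ∈ US X A0 t, ((i:Int)+1) =
        ∑ i ∈ (Finset.range A0.length).filter (fun i => ¬ fin2b X A0 t 0 i = true), ((i:Int)+1) := rfl
    rcases Nat.lt_or_ge t 1 with ht | ht
    · -- t = 0 : res is still all zeros, sum 0 ≠ fin
      rw [hw, if_neg (by omega), add_zero]
      constructor
      · intro hsum
        exfalso
        have h1 : ∑ i ∈ US X A0 t, ((i:Int)+1) = 0 := by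
          rw [hUsum]; omega
        have h2 := sum_ge_card (US X A0 t)
        omega
      · intro h; omega
    · rw [hw, if_pos ⟨ht, hlt⟩]
      obtain ⟨humem, hub⟩ := maxUnf_spec X A0 t hlt
      constructor
      · -- sum equal forces a single unserved person
        intro hsum
        refine ⟨?_, Or.inl ht⟩
        by_contra hcnt
        have hcard2 : 2 ≤ (US X A0 t).card := by omega
        have herase : ((maxUnf X A0 t : Int) + 1)
            + ∑ i ∈ (US X A0 t).erase (maxUnf X A0 t), ((i:Int)+1)
            = ∑ i ∈ US X A0 t, ((i:Int)+1) :=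
          Finset.add_sum_erase (US X A0 t) (fun i => ((i:Int)+1)) humem
        have hcarde : 1 ≤ ((US X A0 t).erase (maxUnf X A0 t)).card := by
          rw [Finset.card_erase_of_mem humem]; omega
        have h2 := sum_ge_card ((US X A0 t).erase (maxUnf X A0 t))
        have : ∑ i ∈ US X A0 t, ((i:Int)+1) = (maxUnf X A0 t : Int) + 1 := by
          rw [hUsum]; omega
        omega
      · -- exactly one unserved: the wrap write is exactly his ticket
        rintro ⟨hcnt, _⟩
        have hU1 : (US X A0 t).card = 1 := by omega
        obtain ⟨a, ha⟩ := Finset.card_eq_one.mp hU1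
        have : maxUnf X A0 t = a := by
          have := humem; rw [ha] at this; exact Finset.mem_singleton.mp this
        subst this
        have : ∑ i ∈ US X A0 t, ((i:Int)+1) = (maxUnf X A0 t : Int) + 1 := by
          rw [ha, Finset.sum_singleton]
        rw [hUsum] at this
        omega
  · -- everyone served
    rw [if_neg (by omega)]
    have hU : (US X A0 t).card = 0 := by omega
    have hUe : (Finset.range A0.length).filter (fun i => ¬ fin2b X A0 t 0 i = true) = ∅ :=
      Finset.card_eq_zero.mp hU
    constructor
    · intro _
      refine ⟨by omega, ?_⟩
      left
      by_contra ht
      have ht0 : t = 0 := by omega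
      subst ht0
      rw [cnt2_zero_zero] at hge
      omega
    · intro _
      rw [← hsplit, hUe, Finset.sum_empty]

-- when the guard stops the loop, the result list is already the target
theorem mRes_eq_target (X : Int) (A0 : List Int) (t : Nat)
    (h : A0.length - 1 ≤ cnt2 X A0 t 0 ∧ (1 ≤ t ∨ A0.length = 0)) :
    mRes X A0 t 0 = target X A0 := by
  unfold mRes target
  apply List.map_congr_left
  intro k hk
  have hk' := List.mem_range.mp hk
  rcases Nat.lt_or_ge k (cnt2 X A0 t 0) with hlt | hge
  · rw [if_pos hlt]
  · rw [if_neg (by omega)]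
    have hc := cnt2_le X A0 t 0
    have hkn : k = A0.length - 1 := by omega
    have hcnt : cnt2 X A0 t 0 = A0.length - 1 := by omega
    have hn : 0 < A0.length := by omega
    have ht : 1 ≤ t := by rcases h.2 with h' | h' <;> omega
    rw [if_pos hkn]
    have hltn : cnt2 X A0 t 0 < A0.length := by omega
    obtain ⟨humem, _⟩ := maxUnf_spec X A0 t hltn
    -- the single unserved person has the last rank
    have humem' := humem
    unfold US at humem'
    simp only [Finset.mem_filter, Finset.mem_range, Bool.not_eq_true] at humem'
    have hrk : ¬ rank X A0 (maxUnf X A0 t) < cnt2 X A0 t 0 := by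
      intro hcon
      have := (fin2b_iff_rank_lt X A0 t 0 humem'.1).mpr hcon
      rw [humem'.2] at this
      exact absurd this (by simp)
    have hrkn : rank X A0 (maxUnf X A0 t) = A0.length - 1 := by
      have := rank_lt_length X A0 humem'.1
      omega
    have hsig : sig X A0 k = maxUnf X A0 t := by
      rw [hkn, ← hrkn, sig_rank X A0 humem'.1]
    rw [hsig]
    unfold mWrap
    simp only [List.range_zero, List.filter_nil, List.max?_nil]
    rw [if_pos ⟨ht, hltn⟩]

-- ---- list plumbing for the step lemma ----
theorem pySet?_neg_one (xs : List Int) (h : xs ≠ []) (v : Int) :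
    PySem.List.pySet? xs (-1) v = some (xs.set (xs.length - 1) v) := by
  have hn : 0 < xs.length := List.length_pos_of_ne_nil h
  unfold PySem.List.pySet? PySem.List.pyIdx?
  rw [if_neg (by omega), if_pos (by push_cast; omega)]
  simp

theorem max?_eq_some_of_mem_of_ub {l : List Nat} {m : Nat} (hm : m ∈ l)
    (hub : ∀ x ∈ l, x ≤ m) : l.max? = some m := by
  cases hmax : l.max? with
  | none =>
    rw [List.max?_eq_none_iff] at hmax
    rw [hmax] at hm
    exact absurd hm (List.not_mem_nil)
  | some u =>
    have h1 : u ≤ m := hub u (List.max?_mem hmax)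
    have h2 : m ≤ u := (List.max?_le_iff hmax).mp (le_refl u) m hm
    rw [Nat.le_antisymm h1 h2]

theorem length_mRes (X : Int) (A0 : List Int) (t m : Nat) : (mRes X A0 t m).length = A0.length := by
  simp [mRes]
theorem length_mRes2 (X : Int) (A0 : List Int) (t m : Nat) : (mRes2 X A0 t m).length = A0.length := by
  simp [mRes2]

theorem mWrap_step_fin (X : Int) (A0 : List Int) {t m : Nat} (h : ¬ ((t:Int)+1 < rv X A0 m)) :
    mWrap X A0 t (m+1) = mWrap X A0 t m := by
  unfold mWrap
  rw [List.range_succ, List.filter_append]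
  have : List.filter (fun i => decide ((t:Int)+1 < rv X A0 i)) [m] = [] := by
    simp only [List.filter_cons, List.filter_nil, decide_eq_true_eq]
    rw [if_neg h]
  rw [this, List.append_nil]

theorem mWrap_step_unf (X : Int) (A0 : List Int) {t m : Nat} (h : (t:Int)+1 < rv X A0 m) :
    mWrap X A0 t (m+1) = (m : Int) + 1 := by
  unfold mWrap
  have hmax : (List.filter (fun i => decide ((t:Int)+1 < rv X A0 i)) (List.range (m+1))).max?
      = some m := by
    apply max?_eq_some_of_mem_of_ub
    · rw [List.mem_filter, List.mem_range]
      exact ⟨by omega, by simp [h]⟩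
    · intro x hx
      rw [List.mem_filter, List.mem_range] at hx
      omega
  rw [hmax]

theorem cnt2_lt_of_unf (X : Int) (A0 : List Int) {t m i : Nat} (hi : i < A0.length)
    (h : fin2b X A0 t m i = false) : cnt2 X A0 t m < A0.length := by
  have hsub : (Finset.range A0.length).filter (fun j => fin2b X A0 t m j = true)
      ⊆ (Finset.range A0.length).erase i := by
    intro k hk
    simp only [Finset.mem_filter, Finset.mem_range] at hk
    apply Finset.mem_erase.mpr
    refine ⟨?_, Finset.mem_range.mpr hk.1⟩
    intro rfl'; subst rfl'
    rw [h] at hk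
    exact absurd hk.2 (by simp)
  have hle := Finset.card_le_card hsub
  rw [Finset.card_erase_of_mem (Finset.mem_range.mpr hi), Finset.card_range] at hle
  unfold cnt2
  omega

-- ---- the step lemma: one body execution moves mid-state m to m+1 ----
theorem step_lemma (X : Int) (A0 : List Int) (t m : Nat) (hX : 1 ≤ X) (hm : m < A0.length) :
    SolveStep X (mA X A0 t m, mRes X A0 t m, mRes2 X A0 t m, mOut X A0 t m) (m : Int)
      = some (mA X A0 t (m+1), mRes X A0 t (m+1), mRes2 X A0 t (m+1), mOut X A0 t (m+1)) := by
  have hget : PySem.List.pyGet? (mA X A0 t m) (m:Int) = some (A0.getD m 0 - (t:Int)*X) := by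
    rw [PySem.List.pyGet?_natCast]
    unfold mA
    rw [List.getElem?_map, List.getElem?_range hm]
    simp
  have hgetD : PySem.List.pyGetD (mRes2 X A0 t m) (m:Int) 0
      = (if fin2b X A0 t m m = true then (rank X A0 m : Int)+1 else 0) := by
    rw [PySem.List.pyGetD_natCast,
      List.getD_eq_getElem _ _ (by rw [length_mRes2]; exact hm)]
    simp [mRes2]
  have harith : (A0.getD m 0 - (t:Int)*X - X ≤ 0) ↔ rv X A0 m ≤ (t:Int)+1 := by
    have h1 := rnd_le_iff X (A0.getD m 0) ((t:Int)+1) hX (by omega)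
    have h2 : A0.getD m 0 - ((t:Int)+1)*X = A0.getD m 0 - (t:Int)*X - X := by ring
    rw [h2] at h1
    exact h1.symm
  have ha' : PySem.List.pySetD (mA X A0 t m) (m:Int) (A0.getD m 0 - (t:Int)*X - X)
      = mA X A0 t (m+1) := by
    rw [PySem.List.pySetD_natCast]
    apply List.ext_getElem (by simp [mA])
    intro i h1 h2
    rw [List.getElem_set]
    rcases Decidable.eq_or_ne m i with rfl | hne
    · rw [if_pos rfl]
      simp only [mA, List.getElem_map, List.getElem_range]
      rw [if_pos (by omega)]
      ring
    · rw [if_neg hne]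
      simp only [mA, List.getElem_map, List.getElem_range]
      by_cases him : i < m
      · rw [if_pos him, if_pos (show i < m+1 by omega)]
      · rw [if_neg him, if_neg (show ¬ i < m+1 by omega)]
  unfold SolveStep
  dsimp only
  rw [hget]
  dsimp only
  rcases lt_trichotomy (rv X A0 m) ((t:Int)+1) with hlt | heq | hgt
  · -- person m was already served in an earlier pass
    have hfin : fin2b X A0 t m m = true := by
      rw [fin2b_self_eq]; simp only [decide_eq_true_eq]; omega
    have hr2 : PySem.List.pyGetD (mRes2 X A0 t m) (m:Int) 0 = (rank X A0 m : Int)+1 := by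
      rw [hgetD, if_pos hfin]
    rw [hr2, if_neg (by intro hc; omega)]
    dsimp only
    rw [hr2, show ((rank X A0 m : Int)+1-1) = ((rank X A0 m : Nat) : Int) by ring,
      PySem.List.pySet?_natCast _ _ _ (by rw [length_mRes]; exact rank_lt_length X A0 hm)]
    dsimp only
    have hns : rv X A0 m ≠ (t:Int)+1 := by omega
    have hrkfin : rank X A0 m < cnt2 X A0 t m := (fin2b_iff_rank_lt X A0 t m hm).mp hfin
    have hres2Same : mRes2 X A0 t (m+1) = mRes2 X A0 t m := by
      unfold mRes2
      apply List.map_congr_left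
      intro i _
      rw [fin2b_step_other X A0 t m hns i]
    have hresSame : mRes X A0 t (m+1) = mRes X A0 t m := by
      unfold mRes
      rw [cnt2_step_other X A0 hns, mWrap_step_fin X A0 (by omega)]
    have hres : (mRes X A0 t m).set (rank X A0 m) ((m:Int)+1) = mRes X A0 t m := by
      apply List.ext_getElem (by simp)
      intro k h1 h2
      rw [List.getElem_set]
      rcases Decidable.eq_or_ne (rank X A0 m) k with rfl | hne
      · rw [if_pos rfl]
        simp only [mRes, List.getElem_map, List.getElem_range]
        rw [if_pos hrkfin, sig_rank X A0 hm]
      · rw [if_neg hne]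
    rw [ha', hres, hresSame, hres2Same]
    unfold mOut
    rw [cnt2_step_other X A0 hns]
  · -- person m is served exactly now: he gets ticket out = rank m + 1
    have hfin : fin2b X A0 t m m = false := by
      rw [fin2b_self_eq]; simp only [decide_eq_false_iff_not]; omega
    have hr2 : PySem.List.pyGetD (mRes2 X A0 t m) (m:Int) 0 = 0 := by
      rw [hgetD, if_neg (by simp [hfin])]
    rw [hr2, if_pos ⟨harith.mpr (by omega), rfl⟩]
    dsimp only
    have hrank := rank_eq_cnt2 X A0 hm heq
    have hset2 : PySem.List.pySetD (mRes2 X A0 t m) (m:Int) (mOut X A0 t m)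
        = mRes2 X A0 t (m+1) := by
      rw [PySem.List.pySetD_natCast]
      apply List.ext_getElem (by simp [mRes2])
      intro i h1 h2
      rw [List.getElem_set]
      rcases Decidable.eq_or_ne m i with rfl | hne
      · rw [if_pos rfl]
        simp only [mRes2, List.getElem_map, List.getElem_range]
        rw [if_pos (by rw [fin2b_step_self X A0 t m heq m]; simp)]
        unfold mOut
        rw [hrank]
      · rw [if_neg hne]
        simp only [mRes2, List.getElem_map, List.getElem_range]
        rw [fin2b_step_self X A0 t m heq i,
          show (i == m) = false by simpa using (Ne.symm hne), Bool.or_false]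
    rw [hset2]
    have hr2' : PySem.List.pyGetD (mRes2 X A0 t (m+1)) (m:Int) 0 = (rank X A0 m : Int)+1 := by
      rw [PySem.List.pyGetD_natCast,
        List.getD_eq_getElem _ _ (by rw [length_mRes2]; exact hm)]
      simp only [mRes2, List.getElem_map, List.getElem_range]
      rw [if_pos (by rw [fin2b_step_self X A0 t m heq m]; simp)]
    rw [hr2', show ((rank X A0 m : Int)+1-1) = ((rank X A0 m : Nat) : Int) by ring,
      PySem.List.pySet?_natCast _ _ _ (by rw [length_mRes]; exact rank_lt_length X A0 hm)]
    dsimp only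
    have hcnt := cnt2_step_self X A0 hm heq
    have hres : (mRes X A0 t m).set (rank X A0 m) ((m:Int)+1) = mRes X A0 t (m+1) := by
      apply List.ext_getElem (by simp [mRes])
      intro k h1 h2
      rw [List.getElem_set]
      rcases Decidable.eq_or_ne (rank X A0 m) k with rfl | hne
      · rw [if_pos rfl]
        simp only [mRes, List.getElem_map, List.getElem_range]
        rw [if_pos (by omega), sig_rank X A0 hm]
      · rw [if_neg hne]
        simp only [mRes, List.getElem_map, List.getElem_range]
        rw [mWrap_step_fin X A0 (by omega)]
        by_cases hk : k < cnt2 X A0 t m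
        · rw [if_pos hk, if_pos (show k < cnt2 X A0 t (m+1) by omega)]
        · rw [if_neg hk, if_neg (show ¬ k < cnt2 X A0 t (m+1) by omega)]
    rw [ha', hres]
    unfold mOut
    rw [hcnt]
    push_cast
    ring_nf
  · -- person m is still unserved: Python writes res[-1] = m+1 (index wraparound)
    have hfin : fin2b X A0 t m m = false := by
      rw [fin2b_self_eq]; simp only [decide_eq_false_iff_not]; omega
    have hr2 : PySem.List.pyGetD (mRes2 X A0 t m) (m:Int) 0 = 0 := by
      rw [hgetD, if_neg (by simp [hfin])]
    rw [hr2, if_neg (by rintro ⟨hc, -⟩; rw [harith] at hc; omega)]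
    dsimp only
    rw [hr2, show ((0:Int)-1) = -1 by norm_num,
      pySet?_neg_one _ (by intro hnil; rw [← length_mRes X A0 t m, hnil] at hm; simp at hm) _,
      length_mRes]
    dsimp only
    have hns : rv X A0 m ≠ (t:Int)+1 := by omega
    have hcnt := cnt2_step_other X A0 (t := t) (m := m) hns
    have hunf : fin2b X A0 t (m+1) m = false := by
      simp only [fin2b, Bool.or_eq_false_iff, Bool.and_eq_false_iff, decide_eq_false_iff_not]
      constructor
      · omega
      · left; omega
    have hcntlt := cnt2_lt_of_unf X A0 hm hunf
    have hres2Same : mRes2 X A0 t (m+1) = mRes2 X A0 t m := by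
      unfold mRes2
      apply List.map_congr_left
      intro i _
      rw [fin2b_step_other X A0 t m hns i]
    have hres : (mRes X A0 t m).set (A0.length - 1) ((m:Int)+1) = mRes X A0 t (m+1) := by
      apply List.ext_getElem (by simp [mRes])
      intro k h1 h2
      rw [List.getElem_set]
      rcases Decidable.eq_or_ne (A0.length - 1) k with rfl | hne
      · rw [if_pos rfl]
        simp only [mRes, List.getElem_map, List.getElem_range]
        rw [if_neg (by omega), mWrap_step_unf X A0 hgt]
        simp
      · rw [if_neg hne]
        simp only [mRes, List.getElem_map, List.getElem_range]
        by_cases hk : k < cnt2 X A0 t m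
        · rw [if_pos hk, if_pos (show k < cnt2 X A0 t (m+1) by omega)]
        · rw [if_neg hk, if_neg (show ¬ k < cnt2 X A0 t (m+1) by omega),
            if_neg (Ne.symm hne), if_neg (Ne.symm hne)]
    rw [ha', hres, hres2Same]
    unfold mOut
    rw [hcnt]

-- index list of the remaining iterations of 'for i in range(N)'
def idxs (n m : Nat) : List Int := (List.range' m (n - m)).map (fun i => (i : Nat))

theorem pass_lemma (X : Int) (A0 : List Int) (t : Nat) (hX : 1 ≤ X) :
    ∀ m ≤ A0.length,
      SolvePassRec X (idxs A0.length m) (mA X A0 t m, mRes X A0 t m, mRes2 X A0 t m, mOut X A0 t m)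
        = some (mA X A0 t A0.length, mRes X A0 t A0.length,
                mRes2 X A0 t A0.length, mOut X A0 t A0.length) := by
  intro m hm
  obtain ⟨d, hd⟩ : ∃ d, A0.length = m + d := ⟨A0.length - m, by omega⟩
  clear hm
  induction d generalizing m with
  | zero =>
    have h0 : idxs A0.length m = [] := by
      unfold idxs
      have h1 : A0.length - m = 0 := by omega
      rw [h1]
      rfl
    have hmn : m = A0.length := by omega
    rw [h0, hmn]
    rfl
  | succ d ih =>
    have hmlt : m < A0.length := by omega
    have hsplit : idxs A0.length m = (m : Int) :: idxs A0.length (m+1) := by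
      unfold idxs
      have h1 : A0.length - m = (A0.length - (m+1)) + 1 := by omega
      rw [h1, List.range'_succ]
      simp
    rw [hsplit]
    show (match SolveStep X (mA X A0 t m, mRes X A0 t m, mRes2 X A0 t m, mOut X A0 t m) (m : Int)
      with
      | none => none
      | some st' => SolvePassRec X (idxs A0.length (m+1)) st') = _
    rw [step_lemma X A0 t m hX hmlt]
    exact ih (m+1) (by omega)

-- ---- a finished pass is the next boundary ----
theorem unf_max? (X : Int) (A0 : List Int) (t : Nat) (h : cnt2 X A0 t 0 < A0.length) :
    ((List.range A0.length).filter (fun i => decide ((t:Int) < rv X A0 i))).max?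
      = some (maxUnf X A0 t) := by
  have hm := (maxUnf_spec X A0 t h).1
  have hmem : maxUnf X A0 t ∈ (List.range A0.length).filter
      (fun i => decide ((t:Int) < rv X A0 i)) := by
    unfold US at hm
    simp only [Finset.mem_filter, Finset.mem_range, fin2b_m0, Bool.not_eq_true,
      decide_eq_false_iff_not, not_le] at hm
    rw [List.mem_filter, List.mem_range]
    simp only [decide_eq_true_eq]
    exact hm
  cases hmax : ((List.range A0.length).filter
      (fun i => decide ((t:Int) < rv X A0 i))).max? with
  | none =>
    rw [List.max?_eq_none_iff] at hmax
    rw [hmax] at hmem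
    exact absurd hmem (List.not_mem_nil)
  | some u =>
    unfold maxUnf
    rw [hmax]
    rfl

theorem mWrap_boundary (X : Int) (A0 : List Int) (t : Nat) (h : cnt2 X A0 (t+1) 0 < A0.length) :
    mWrap X A0 t A0.length = mWrap X A0 (t+1) 0 := by
  unfold mWrap
  simp only [List.range_zero, List.filter_nil, List.max?_nil]
  have h2 := unf_max? X A0 (t+1) h
  rw [show (fun i => decide ((((t+1):Nat):Int) < rv X A0 i))
      = (fun i => decide ((t:Int)+1 < rv X A0 i)) from funext (fun i => by push_cast; rfl)] at h2
  rw [h2]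
  dsimp only
  rw [if_pos ⟨by omega, h⟩]

theorem mA_boundary (X : Int) (A0 : List Int) (t : Nat) :
    mA X A0 t A0.length = mA X A0 (t+1) 0 := by
  unfold mA
  apply List.map_congr_left
  intro i hi
  rw [if_pos (List.mem_range.mp hi), if_neg (by omega)]
  push_cast
  ring_nf

theorem mRes2_boundary (X : Int) (A0 : List Int) (t : Nat) :
    mRes2 X A0 t A0.length = mRes2 X A0 (t+1) 0 := by
  unfold mRes2
  apply List.map_congr_left
  intro i hi
  rw [fin2b_boundary X A0 t (List.mem_range.mp hi)]

theorem mOut_boundary (X : Int) (A0 : List Int) (t : Nat) :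
    mOut X A0 t A0.length = mOut X A0 (t+1) 0 := by
  unfold mOut
  rw [cnt2_boundary]

theorem mRes_boundary (X : Int) (A0 : List Int) (t : Nat) :
    mRes X A0 t A0.length = mRes X A0 (t+1) 0 := by
  apply List.ext_getElem (by simp [mRes])
  intro k h1 h2
  have hk2 := h2
  rw [length_mRes] at hk2
  simp only [mRes, List.getElem_map, List.getElem_range]
  rw [cnt2_boundary X A0 t]
  by_cases hk : k < cnt2 X A0 (t+1) 0
  · rw [if_pos hk, if_pos hk]
  · rw [if_neg hk, if_neg hk]
    by_cases hkn : k = A0.length - 1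
    · rw [if_pos hkn, if_pos hkn, mWrap_boundary X A0 t (by omega)]
    · rw [if_neg hkn, if_neg hkn]

theorem idxs_zero (n : Nat) : idxs n 0 = PySem.List.pyRange 0 (n:Int) 1 := by
  rw [PySem.List.pyRange_one]
  unfold idxs
  have h1 : ((n:Int) - 0).toNat = n := by omega
  rw [h1, Nat.sub_zero, ← List.range_eq_range']
  simp

theorem Mnat_le (X : Int) (A0 : List Int) {t : Nat}
    (h : (A0.foldl max 1).toNat ≤ t) : (A0.foldl max 1) ≤ (t:Int) := by
  have h1 := one_le_foldl_max A0
  omega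

theorem loop_lemma (X : Int) (A0 : List Int) (hX : 1 ≤ X) :
    ∀ (fuel t : Nat), (A0.foldl max 1).toNat + 1 ≤ fuel + t → 1 ≤ fuel →
      SolveLoop (A0.length : Int) X (∑ i ∈ Finset.range A0.length, ((i : Int) + 1)) fuel
        (mA X A0 t 0, mRes X A0 t 0, mRes2 X A0 t 0, mOut X A0 t 0)
      = some (target X A0) := by
  intro fuel
  induction fuel with
  | zero =>
    intro t _ h2
    exact absurd h2 (by norm_num)
  | succ f ih =>
    intro t h1 _
    have hMnat1 : 1 ≤ (A0.foldl max 1).toNat := by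
      have := one_le_foldl_max A0
      omega
    unfold SolveLoop
    by_cases hg : (mRes X A0 t 0).sum = ∑ i ∈ Finset.range A0.length, ((i : Int) + 1)
    · rw [if_neg (not_not.mpr hg)]
      rw [mRes_eq_target X A0 t ((guard_iff X A0 t).mp hg)]
    · rw [if_pos hg]
      have hpass := pass_lemma X A0 t hX 0 (by omega)
      rw [idxs_zero] at hpass
      rw [hpass]
      dsimp only
      rw [mA_boundary, mRes_boundary, mRes2_boundary, mOut_boundary]
      rcases Nat.eq_zero_or_pos f with hf | hf
      · exfalso
        subst hf
        have ht : (A0.foldl max 1).toNat ≤ t := by omega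
        have hfull := cnt2_full X A0 hX (Mnat_le X A0 ht)
        exact hg ((guard_iff X A0 t).mpr ⟨by omega, Or.inl (by omega)⟩)
      · exact ih (t+1) (by omega) hf

theorem initial_state (X : Int) (A0 : List Int) :
    (A0, A0.map (fun _ => (0:Int)), A0.map (fun _ => (0:Int)), (1:Int))
    = (mA X A0 0 0, mRes X A0 0 0, mRes2 X A0 0 0, mOut X A0 0 0) := by
  have hA : A0 = mA X A0 0 0 := by
    apply List.ext_getElem (by simp [mA])
    intro i h1 h2
    simp only [mA, List.getElem_map, List.getElem_range]
    rw [if_neg (by omega), List.getD_eq_getElem A0 0 h1]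
    push_cast
    ring
  have hRes2 : A0.map (fun _ => (0:Int)) = mRes2 X A0 0 0 := by
    apply List.ext_getElem (by simp [mRes2])
    intro i h1 h2
    simp only [mRes2, List.getElem_map, List.getElem_range, fin2b_zero_zero]
    rw [if_neg (by simp)]
  have hRes : A0.map (fun _ => (0:Int)) = mRes X A0 0 0 := by
    apply List.ext_getElem (by simp [mRes])
    intro i h1 h2
    simp only [mRes, List.getElem_map, List.getElem_range, cnt2_zero_zero]
    rw [if_neg (by omega)]
    have hw : mWrap X A0 0 0 = 0 := by
      unfold mWrap
      simp only [List.range_zero, List.filter_nil, List.max?_nil]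
      rw [if_neg (by omega)]
    rw [hw]
    simp
  have hOut : (1:Int) = mOut X A0 0 0 := by
    unfold mOut
    rw [cnt2_zero_zero]
    norm_num
  rw [← hA, ← hRes, ← hRes2, ← hOut]

theorem fin_value (n : Nat) :
    (PySem.List.pyRange 1 ((n : Int) + 1) 1).sum = ∑ i ∈ Finset.range n, ((i : Int) + 1) := by
  rw [PySem.List.pyRange_one]
  have h1 : ((n:Int) + 1 - 1).toNat = n := by omega
  rw [h1]
  show (∑ i ∈ Finset.range n, ((1:Int) + (i:Int))) = ∑ i ∈ Finset.range n, ((i:Int) + 1)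
  exact Finset.sum_congr rfl (fun i _ => by ring)

-- ---- B side ----
theorem insertBy_pairwise {α : Type} (before : α → α → Bool)
    (htr : ∀ a b c, before a b = true → before b c = true → before a c = true)
    (x : α) (ys : List α) (hpw : ys.Pairwise (fun a b => before a b = true))
    (hcmp : ∀ y ∈ ys, before x y = true ∨ before y x = true) :
    (PySem.List.insertBy before x ys).Pairwise (fun a b => before a b = true) := by
  induction ys with
  | nil =>
    show List.Pairwise _ [x]
    simp
  | cons y ys ih =>
    have hdef : PySem.List.insertBy before x (y :: ys)
        = if before x y = true then x :: y :: ys else y :: PySem.List.insertBy before x ys := rfl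
    rw [hdef]
    rw [List.pairwise_cons] at hpw
    by_cases hxy : before x y = true
    · rw [if_pos hxy]
      apply List.pairwise_cons.mpr
      refine ⟨?_, List.pairwise_cons.mpr ⟨hpw.1, hpw.2⟩⟩
      intro z hz
      rcases List.mem_cons.mp hz with rfl | hz'
      · exact hxy
      · exact htr x y z hxy (hpw.1 z hz')
    · rw [if_neg hxy]
      apply List.pairwise_cons.mpr
      constructor
      · intro z hz
        rcases (PySem.List.mem_insertBy before x z ys).mp hz with hzx | hz'
        · subst hzx
          rcases hcmp y List.mem_cons_self with h | h
          · exact absurd h hxy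
          · exact h
        · exact hpw.1 z hz'
      · exact ih hpw.2 (fun z hz => hcmp z (List.mem_cons_of_mem y hz))

theorem foldl_insertBy_pairwise {α : Type} (before : α → α → Bool)
    (htr : ∀ a b c, before a b = true → before b c = true → before a c = true) :
    ∀ (l acc : List α), acc.Pairwise (fun a b => before a b = true) →
      (∀ a ∈ l, ∀ b ∈ acc, before a b = true ∨ before b a = true) →
      (∀ a ∈ l, ∀ b ∈ l, a ≠ b → before a b = true ∨ before b a = true) →
      l.Nodup →
      (l.foldl (fun acc x => PySem.List.insertBy before x acc) acc).Pairwise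
        (fun a b => before a b = true)
  | [], acc, hacc, _, _, _ => hacc
  | x :: l, acc, hacc, hcmp, hcmp2, hnd => by
    rw [List.foldl_cons]
    have hndx : x ∉ l := (List.nodup_cons.mp hnd).1
    apply foldl_insertBy_pairwise before htr l (PySem.List.insertBy before x acc)
    · exact insertBy_pairwise before htr x acc hacc
        (fun y hy => hcmp x List.mem_cons_self y hy)
    · intro a ha b hb
      rcases (PySem.List.mem_insertBy before x b acc).mp hb with hbx | hb'
      · subst hbx
        exact hcmp2 a (List.mem_cons_of_mem _ ha) b List.mem_cons_self
          (fun hab => hndx (hab ▸ ha))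
      · exact hcmp a (List.mem_cons_of_mem x ha) b hb'
    · intro a ha b hb hab
      exact hcmp2 a (List.mem_cons_of_mem x ha) b (List.mem_cons_of_mem x hb) hab
    · exact (List.nodup_cons.mp hnd).2

theorem sorted2_eq_of_perm_of_pairwise (k1 k2 : Int → Int) (xs ys : List Int)
    (hperm : ys.Perm xs)
    (hnd : ∀ a ∈ xs, ∀ b ∈ xs, k2 a = k2 b → a = b)
    (hpw : ys.Pairwise (fun a b => k1 a < k1 b ∨ (k1 a = k1 b ∧ k2 a < k2 b))) :
    PySem.List.sorted2 xs k1 k2 = ys := by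
  set B : Int → Int → Bool := fun a b =>
    decide (k1 a < k1 b) || (!decide (k1 b < k1 a) && decide (k2 a < k2 b)) with hB
  have hBiff : ∀ a b : Int, B a b = true ↔ (k1 a < k1 b ∨ (k1 a = k1 b ∧ k2 a < k2 b)) := by
    intro a b
    rw [hB]
    simp only [Bool.or_eq_true, Bool.and_eq_true, Bool.not_eq_eq_eq_not, Bool.not_true,
      decide_eq_true_eq, decide_eq_false_iff_not]
    omega
  have htr : ∀ a b c : Int, B a b = true → B b c = true → B a c = true := by
    intro a b c h1 h2
    rw [hBiff] at h1 h2 ⊢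
    omega
  have hdef : PySem.List.sorted2 xs k1 k2
      = xs.foldl (fun acc x => PySem.List.insertBy B x acc) [] := rfl
  -- ys is strictly increasing, hence Nodup, hence xs too
  have hysnd : ys.Nodup := by
    apply List.Pairwise.imp _ hpw
    intro a b h hab
    subst hab
    omega
  have hxsnd : xs.Nodup := hperm.nodup_iff.mp hysnd
  have hcmp2 : ∀ a ∈ xs, ∀ b ∈ xs, a ≠ b → B a b = true ∨ B b a = true := by
    intro a ha b hb hab
    rw [hBiff, hBiff]
    have hsnd : k2 a ≠ k2 b := by
      intro h
      exact hab (hnd a ha b hb h)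
    omega
  have hres := foldl_insertBy_pairwise B htr xs [] (by simp) (by simp) hcmp2 hxsnd
  rw [hdef]
  have hresperm : (xs.foldl (fun acc x => PySem.List.insertBy B x acc) []).Perm ys := by
    have h1 : (PySem.List.sorted2 xs k1 k2).Perm xs :=
      PySem.List.sorted2_perm xs _ _ false
    rw [hdef] at h1
    exact h1.trans hperm.symm
  have hyspwB : ys.Pairwise (fun a b => B a b = true) := by
    apply List.Pairwise.imp _ hpw
    intro a b h
    exact (hBiff a b).mpr h
  apply List.eq_of_perm_of_sorted _ hres hyspwB hresperm
  intro a b _ _ h1 h2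
  rw [hBiff] at h1 h2
  omega

theorem take_set_succ (r : List Int) (s : Nat) (v : Int) (h : s < r.length) :
    (r.set s v).take (s+1) = r.take s ++ [v] := by
  apply List.ext_getElem (by simp; omega)
  intro k h1 h2
  have hk : k < s + 1 := by simp at h1; omega
  rw [List.getElem_take, List.getElem_set]
  by_cases hks : k < s
  · rw [if_neg (by omega), List.getElem_append_left (by simp; omega), List.getElem_take]
  · have hks' : k = s := by omega
    rw [if_pos (by omega), List.getElem_append_right (by simp; omega)]
    simp [hks']

theorem fold_sets (zs : List Int) :
    ∀ (s : Nat) (r : List Int), s + zs.length = r.length →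
      (PySem.List.enumerate zs (s:Int)).foldl
        (fun r p => PySem.List.pySetD r p.1 (p.2 + 1)) r
      = r.take s ++ zs.map (· + 1) := by
  induction zs with
  | nil =>
    intro s r hlen
    simp only [List.length_nil] at hlen
    rw [PySem.List.enumerate_nil]
    simp only [List.foldl_nil, List.map_nil, List.append_nil]
    rw [List.take_of_length_le (by omega)]
  | cons z zs ih =>
    intro s r hlen
    simp only [List.length_cons] at hlen
    rw [PySem.List.enumerate_cons, List.foldl_cons]
    have hstep : PySem.List.pySetD r (s:Int) (z + 1) = r.set s (z + 1) :=
      PySem.List.pySetD_natCast r s (z+1)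
    have hcast : ((s:Int) + 1) = (((s+1 : Nat)):Int) := by push_cast; ring
    rw [hstep, hcast, ih (s+1) (r.set s (z+1)) (by simp only [List.length_set]; omega)]
    rw [take_set_succ r s (z+1) (by omega)]
    simp

theorem alt_eq_target (X : Int) (A0 : List Int) :
    Solve_alt (A0.length : Int) X A0 = target X A0 := by
  have hdef : Solve_alt (A0.length : Int) X A0
      = (PySem.List.enumerate (PySem.List.sorted2 (PySem.List.pyRange 0 (A0.length:Int) 1)
          (fun i => max 1 (-(PySem.Int.floordiv (-(PySem.List.pyGetD A0 i 0)) X)))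
          (fun i => i))).foldl (fun r p => PySem.List.pySetD r p.1 (p.2 + 1))
          (List.replicate A0.length (0:Int)) := rfl
  rw [hdef]
  have hrange : PySem.List.pyRange 0 (A0.length:Int) 1
      = (List.range A0.length).map (fun (k : Nat) => (k : Int)) := by
    rw [PySem.List.pyRange_one]
    have h1 : ((A0.length:Int) - 0).toNat = A0.length := by omega
    rw [h1]
    exact List.map_congr_left (fun k _ => by omega)
  have hkey : ∀ m : Nat, (max 1 (-(PySem.Int.floordiv (-(PySem.List.pyGetD A0 (m:Int) 0)) X)))
      = rv X A0 m := by
    intro m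
    rw [PySem.List.pyGetD_natCast]
    rfl
  -- the sorted order is exactly sig
  have hσperm : ((List.range A0.length).map (sig X A0)).Perm (List.range A0.length) := by
    have hnd : ((List.range A0.length).map (sig X A0)).Nodup := by
      apply List.Nodup.map_on ?_ List.nodup_range
      intro a ha b hb hab
      have ha' := List.mem_range.mp ha
      have hb' := List.mem_range.mp hb
      have h1 := (sig_spec X A0 ha').2
      have h2 := (sig_spec X A0 hb').2
      rw [hab] at h1
      omega
    have hsub : ((List.range A0.length).map (sig X A0)) ⊆ List.range A0.length := by
      intro z hz
      obtain ⟨k, hk, rfl⟩ := List.mem_map.mp hz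
      exact List.mem_range.mpr (sig_spec X A0 (List.mem_range.mp hk)).1
    exact (List.subperm_of_subset hnd hsub).perm_of_length_le (by simp)
  have hysperm : ((List.range A0.length).map (fun k => ((sig X A0 k : Nat) : Int))).Perm
      ((List.range A0.length).map (fun (k : Nat) => (k : Int))) := by
    have h := List.Perm.map (fun k : Nat => (k : Int)) hσperm
    rw [List.map_map] at h
    exact h
  have hnd2 : ∀ a ∈ (List.range A0.length).map (fun (k : Nat) => (k : Int)),
      ∀ b ∈ (List.range A0.length).map (fun (k : Nat) => (k : Int)), a = b → a = b :=
    fun a _ b _ h => h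
  have hpw2 : ((List.range A0.length).map (fun k => ((sig X A0 k : Nat) : Int))).Pairwise
      (fun a b => (max 1 (-(PySem.Int.floordiv (-(PySem.List.pyGetD A0 a 0)) X)))
          < (max 1 (-(PySem.Int.floordiv (-(PySem.List.pyGetD A0 b 0)) X)))
        ∨ ((max 1 (-(PySem.Int.floordiv (-(PySem.List.pyGetD A0 a 0)) X)))
          = (max 1 (-(PySem.Int.floordiv (-(PySem.List.pyGetD A0 b 0)) X)))  ∧ a < b)) := by
    rw [List.pairwise_iff_getElem]
    intro i j hi hj hij
    have hin : i < A0.length := by simpa using hi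
    have hjn : j < A0.length := by simpa using hj
    simp only [List.getElem_map, List.getElem_range]
    rw [hkey, hkey]
    have hσi := sig_spec X A0 hin
    have hσj := sig_spec X A0 hjn
    have hklt : kltB X A0 (sig X A0 i) (sig X A0 j) = true := by
      rcases Decidable.eq_or_ne (sig X A0 i) (sig X A0 j) with he | hne
      · exfalso
        rw [he] at hσi
        omega
      · rcases kltB_total X A0 hne with h | h
        · exact h
        · exfalso
          have := rank_lt_rank X A0 hσi.1 hσj.1 h
          omega
    revert hklt
    simp only [kltB, Bool.or_eq_true, Bool.and_eq_true, decide_eq_true_eq]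
    intro hklt
    rcases hklt with h | ⟨h1, h2⟩
    · exact Or.inl h
    · right
      constructor
      · exact h1
      · omega
  rw [hrange,
    sorted2_eq_of_perm_of_pairwise _ _ _ _ hysperm hnd2 hpw2,
    show ((0:Int)) = ((0:Nat):Int) by norm_num,
    fold_sets _ 0 _ (by simp)]
  unfold target
  rw [List.take_zero, List.nil_append, List.map_map]
  apply List.map_congr_left
  intro k _
  rfl

-- ===== VERDICT (by name: the statement is the Claim_ definition above) =====
theorem Solve_spec : Claim_equal_Solve := by
  intro N X A hdom hpre
  unfold Spec_Solve
  rcases hpre with hneg | ⟨hN, hX⟩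
  · -- N ≤ 0 : A's fin is 0 and its loop never runs; B sorts the empty range(N)
    have hA : Solve N X A = A.map (fun _ => (0:Int)) := by
      have hufA : Solve N X A =
          (SolveLoop N X ((PySem.List.pyRange 1 (N + 1) 1).sum)
            ((A.foldl max 1).toNat + 1)
            (A, A.map (fun _ => (0:Int)), A.map (fun _ => (0:Int)), 1)).getD [] := rfl
      rw [hufA, PySem.List.pyRange_one_eq_nil (by omega)]
      unfold SolveLoop
      rw [if_neg (by simp)]
      rfl
    have hB : Solve_alt N X A = List.replicate A.length (0:Int) := by
      have hufB : Solve_alt N X A =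
          (PySem.List.enumerate (PySem.List.sorted2 (PySem.List.pyRange 0 N 1)
            (fun i => max 1 (-(PySem.Int.floordiv (-(PySem.List.pyGetD A i 0)) X)))
            (fun i => i))).foldl (fun r p => PySem.List.pySetD r p.1 (p.2 + 1))
            (List.replicate A.length (0:Int)) := rfl
      rw [hufB, PySem.List.pyRange_one_eq_nil (by omega)]
      rfl
    rw [hA, hB]
    exact List.map_const
  · subst hN
    rw [alt_eq_target]
    have hufA : Solve (A.length : Int) X A =
        (SolveLoop (A.length : Int) X ((PySem.List.pyRange 1 ((A.length : Int) + 1) 1).sum)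
          ((A.foldl max 1).toNat + 1)
          (A, A.map (fun _ => (0:Int)), A.map (fun _ => (0:Int)), 1)).getD [] := rfl
    rw [hufA, fin_value, initial_state X A, loop_lemma X A hX _ 0 (by omega) (by omega)]
    rfl
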